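-- pv_equiv track=rewrite | github.com/Kinshua/Siren | core/cortex/adversarial_ml.py | _html_entity_named
-- ===== SOURCE A (Python) =====
-- def _html_entity_named(payload: str) -> str:
--     """Use named HTML entities where available."""
--     named_entities = {
--         "<": "&lt;", ">": "&gt;", "&": "&amp;", '"': "&quot;",
--         "'": "&apos;", " ": "&nbsp;", "/": "&sol;", "\\": "&bsol;",
--         "=": "&equals;", "(": "&lpar;", ")": "&rpar;",
--     }
--     result = []
--     for ch in payload:
--         if ch in named_entities:
--             result.append(named_entities[ch])
--         else:
--             result.append(ch)
--     return "".join(result)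
-- ===== SOURCE B (Python) =====
-- def _html_entity_named(payload: str) -> str:
--     """Use named HTML entities where available."""
--     return (payload.replace("&", "&amp;")
--                    .replace("<", "&lt;")
--                    .replace(">", "&gt;")
--                    .replace('"', "&quot;")
--                    .replace("'", "&apos;")
--                    .replace(" ", "&nbsp;")
--                    .replace("/", "&sol;")
--                    .replace("\\", "&bsol;")
--                    .replace("=", "&equals;")
--                    .replace("(", "&lpar;")
--                    .replace(")", "&rpar;"))
-- ===== Notes on version B (the rewrite author's own statement) =====
-- stated objective: idiomatic
-- what changed: Replaced the per-character dict-lookup-and-append loop with a chain of eleven whole-string str.replace passes in html.escape style, with the ampersand replaced first so entities introduced by later passes are not double-encoded.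
import Mathlib
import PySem

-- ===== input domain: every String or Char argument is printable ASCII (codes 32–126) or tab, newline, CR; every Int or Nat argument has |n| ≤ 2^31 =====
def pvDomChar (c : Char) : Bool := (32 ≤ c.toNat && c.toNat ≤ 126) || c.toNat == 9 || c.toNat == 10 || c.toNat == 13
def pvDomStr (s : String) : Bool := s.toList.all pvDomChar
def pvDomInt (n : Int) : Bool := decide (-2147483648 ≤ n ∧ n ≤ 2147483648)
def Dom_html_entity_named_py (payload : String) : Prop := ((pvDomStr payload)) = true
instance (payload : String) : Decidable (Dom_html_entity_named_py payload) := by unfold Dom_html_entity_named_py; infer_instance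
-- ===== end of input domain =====

-- B replaces A's per-character dict-lookup loop by a chain of whole-string replace passes (ampersand first); idiomatic, and measurably faster in a timing run (C-level str.replace vs a Python-level loop).

-- ===== PORT A =====
def html_entity_named_py (payload : String) : String :=
  let named : PySem.Dict Char String := PySem.Dict.ofList
    [('<', "&lt;"), ('>', "&gt;"), ('&', "&amp;"), ('"', "&quot;"),
     ('\'', "&apos;"), (' ', "&nbsp;"), ('/', "&sol;"), ('\\', "&bsol;"),
     ('=', "&equals;"), ('(', "&lpar;"), (')', "&rpar;")]
  let result : List String := payload.toList.foldl (fun r ch =>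
    match named.get? ch with
    | some e => r ++ [e]
    | none   => r ++ [ch.toString]) []
  PySem.Str.join "" result

-- ===== PORT B =====
def html_entity_named_py_alt (payload : String) : String :=
  let r := PySem.Str.replace payload "&" "&amp;"
  let r := PySem.Str.replace r "<" "&lt;"
  let r := PySem.Str.replace r ">" "&gt;"
  let r := PySem.Str.replace r "\"" "&quot;"
  let r := PySem.Str.replace r "'" "&apos;"
  let r := PySem.Str.replace r " " "&nbsp;"
  let r := PySem.Str.replace r "/" "&sol;"
  let r := PySem.Str.replace r "\\" "&bsol;"
  let r := PySem.Str.replace r "=" "&equals;"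
  let r := PySem.Str.replace r "(" "&lpar;"
  let r := PySem.Str.replace r ")" "&rpar;"
  r

-- ===== PRECONDITION & SPEC =====
def Spec_html_entity_named_py (payload : String) (out : String) : Prop := out = html_entity_named_py_alt payload
instance (payload : String) (out : String) : Decidable (Spec_html_entity_named_py payload out) := by unfold Spec_html_entity_named_py; infer_instance

-- ===== CLAIM (what is proved, stated in full; the proofs are below) =====
def Claim_equal_html_entity_named_py : Prop := ∀ (payload : String), Dom_html_entity_named_py payload → Spec_html_entity_named_py payload (html_entity_named_py payload)

-- ===== LEMMAS AND PROOFS =====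

-- Chars.replace with a single-char pattern is a per-character flatMap expansion.
theorem pv_go_single (c : Char) (new : List Char) :
    ∀ (l : List Char) (fuel : Nat) (acc : List Char), l.length ≤ fuel →
      PySem.Chars.replace.go [c] new fuel l acc
        = acc.reverse ++ l.flatMap (fun ch => if ch = c then new else [ch]) := by
  intro l
  induction l with
  | nil => intro fuel acc _; cases fuel <;> simp [PySem.Chars.replace.go]
  | cons ch t ih =>
    intro fuel acc h
    cases fuel with
    | zero => simp at h
    | succ f =>
      rw [PySem.Chars.replace.go]
      by_cases hc : ch = c
      · subst hc
        simp [List.isPrefixOf, ih f (new.reverse ++ acc) (by simpa using h)]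
      · simp [List.isPrefixOf, hc, Ne.symm hc, ih f (ch :: acc) (by simpa using h)]

theorem pv_repl_char (l : List Char) (c : Char) (new : List Char) :
    PySem.Chars.replace l [c] new = l.flatMap (fun ch => if ch = c then new else [ch]) := by
  rw [PySem.Chars.replace]
  simp [pv_go_single c new l l.length [] le_rfl]

-- join with empty separator is concatenation
theorem pv_join_nil_flatten (parts : List (List Char)) :
    PySem.Chars.join [] parts = parts.flatten := by
  induction parts with
  | nil => simp [PySem.Chars.join_nil]
  | cons a t ih => cases t with
    | nil => simp [PySem.Chars.join, List.intercalate]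
    | cons b t2 => simp [PySem.Chars.join_cons_cons] at *; simpa using ih

-- A's per-character output, as a list of chars
def pvG (ch : Char) : List Char :=
  match (PySem.Dict.ofList
    [('<', "&lt;"), ('>', "&gt;"), ('&', "&amp;"), ('"', "&quot;"),
     ('\'', "&apos;"), (' ', "&nbsp;"), ('/', "&sol;"), ('\\', "&bsol;"),
     ('=', "&equals;"), ('(', "&lpar;"), (')', "&rpar;")] : PySem.Dict Char String).get? ch with
  | some e => e.toList
  | none   => [ch]

-- B's per-character output: expansion of '&' pushed through the other ten replaces
def pvF (ch : Char) : List Char :=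
  ((((((((((if ch = '&' then "&amp;".toList else [ch]).flatMap
    (fun x => if x = '<' then "&lt;".toList else [x])).flatMap
    (fun x => if x = '>' then "&gt;".toList else [x])).flatMap
    (fun x => if x = '"' then "&quot;".toList else [x])).flatMap
    (fun x => if x = '\'' then "&apos;".toList else [x])).flatMap
    (fun x => if x = ' ' then "&nbsp;".toList else [x])).flatMap
    (fun x => if x = '/' then "&sol;".toList else [x])).flatMap
    (fun x => if x = '\\' then "&bsol;".toList else [x])).flatMap
    (fun x => if x = '=' then "&equals;".toList else [x])).flatMap
    (fun x => if x = '(' then "&lpar;".toList else [x])).flatMap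
    (fun x => if x = ')' then "&rpar;".toList else [x])

theorem pvF_eq_pvG (ch : Char) : pvF ch = pvG ch := by
  by_cases h1 : ch = '<'; · subst h1; decide
  by_cases h2 : ch = '>'; · subst h2; decide
  by_cases h3 : ch = '&'; · subst h3; decide
  by_cases h4 : ch = '"'; · subst h4; decide
  by_cases h5 : ch = '\''; · subst h5; decide
  by_cases h6 : ch = ' '; · subst h6; decide
  by_cases h7 : ch = '/'; · subst h7; decide
  by_cases h8 : ch = '\\'; · subst h8; decide
  by_cases h9 : ch = '='; · subst h9; decide
  by_cases h10 : ch = '('; · subst h10; decide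
  by_cases h11 : ch = ')'; · subst h11; decide
  simp [pvF, pvG, PySem.Dict.ofList, PySem.Dict.get?, PySem.Dict.empty,
        PySem.Dict.update, PySem.Dict.insert, List.find?,
        h1, h2, h3, h4, h5, h6, h7, h8, h9, h10, h11,
        beq_eq_false_iff_ne.mpr (Ne.symm h1), beq_eq_false_iff_ne.mpr (Ne.symm h2),
        beq_eq_false_iff_ne.mpr (Ne.symm h3), beq_eq_false_iff_ne.mpr (Ne.symm h4),
        beq_eq_false_iff_ne.mpr (Ne.symm h5), beq_eq_false_iff_ne.mpr (Ne.symm h6),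
        beq_eq_false_iff_ne.mpr (Ne.symm h7), beq_eq_false_iff_ne.mpr (Ne.symm h8),
        beq_eq_false_iff_ne.mpr (Ne.symm h9), beq_eq_false_iff_ne.mpr (Ne.symm h10),
        beq_eq_false_iff_ne.mpr (Ne.symm h11)]

theorem pvA_toList (payload : String) :
    (html_entity_named_py payload).toList = payload.toList.flatMap pvG := by
  rw [html_entity_named_py]
  have hf : (fun (r : List String) ch =>
      match (PySem.Dict.ofList
        [('<', "&lt;"), ('>', "&gt;"), ('&', "&amp;"), ('"', "&quot;"),
         ('\'', "&apos;"), (' ', "&nbsp;"), ('/', "&sol;"), ('\\', "&bsol;"),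
         ('=', "&equals;"), ('(', "&lpar;"), (')', "&rpar;")] : PySem.Dict Char String).get? ch with
      | some e => r ++ [e]
      | none   => r ++ [ch.toString])
    = (fun (r : List String) ch => r ++ [match (PySem.Dict.ofList
        [('<', "&lt;"), ('>', "&gt;"), ('&', "&amp;"), ('"', "&quot;"),
         ('\'', "&apos;"), (' ', "&nbsp;"), ('/', "&sol;"), ('\\', "&bsol;"),
         ('=', "&equals;"), ('(', "&lpar;"), (')', "&rpar;")] : PySem.Dict Char String).get? ch with
      | some e => e
      | none   => ch.toString]) := by
    funext r ch
    cases (PySem.Dict.ofList _ : PySem.Dict Char String).get? ch <;> simp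
  simp only [hf, PySem.List.foldl_append_singleton_eq_map, List.nil_append]
  rw [PySem.Str.toList_join]
  simp only [String.toList_empty]
  rw [pv_join_nil_flatten, List.map_map, List.flatten_eq_flatMap, List.flatMap_map]
  apply List.flatMap_congr
  intro ch _
  simp only [Function.comp, pvG]
  cases (PySem.Dict.ofList _ : PySem.Dict Char String).get? ch <;> simp

theorem pvB_toList (payload : String) :
    (html_entity_named_py_alt payload).toList = payload.toList.flatMap pvF := by
  rw [html_entity_named_py_alt]
  simp only [PySem.Str.toList_replace,
    show ("&" : String).toList = ['&'] from rfl,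
    show ("<" : String).toList = ['<'] from rfl,
    show (">" : String).toList = ['>'] from rfl,
    show ("\"" : String).toList = ['\"'] from rfl,
    show ("'" : String).toList = ['\''] from rfl,
    show (" " : String).toList = [' '] from rfl,
    show ("/" : String).toList = ['/'] from rfl,
    show ("\\" : String).toList = ['\\'] from rfl,
    show ("=" : String).toList = ['='] from rfl,
    show ("(" : String).toList = ['('] from rfl,
    show (")" : String).toList = [')'] from rfl]
  simp only [pv_repl_char, List.flatMap_assoc]
  exact List.flatMap_congr fun ch _ => by simp only [pvF, List.flatMap_assoc]

-- ===== VERDICT (by name: the statement is the Claim_ definition above) =====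
theorem html_entity_named_py_spec : Claim_equal_html_entity_named_py := by
  intro payload _
  unfold Spec_html_entity_named_py
  apply String.toList_inj.mp
  rw [pvA_toList, pvB_toList]
  exact (List.flatMap_congr fun ch _ => (pvF_eq_pvG ch).symm)
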